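-- pv_equiv track=rewrite | github.com/DevMarcosLima/lc-admin-backend | app/services/card_catalog.py | _infer_generation
-- ===== SOURCE A (Python) =====
-- from typing import Any
--
-- _GENERATION_RANGES: list[tuple[int, int, str]] = [
--     (1, 151, "generation-i"),
--     (152, 251, "generation-ii"),
--     (252, 386, "generation-iii"),
--     (387, 493, "generation-iv"),
--     (494, 649, "generation-v"),
--     (650, 721, "generation-vi"),
--     (722, 809, "generation-vii"),
--     (810, 905, "generation-viii"),
--     (906, 1200, "generation-ix"),
-- ]
--
-- def _infer_generation(national_dex_numbers: Any) -> str | None: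
--     if not isinstance(national_dex_numbers, list) or not national_dex_numbers:
--         return None
--
--     first = national_dex_numbers[0]
--     if not isinstance(first, int):
--         return None
--
--     for lower, upper, generation in _GENERATION_RANGES:
--         if lower <= first <= upper:
--             return generation
--
--     return None
-- ===== SOURCE B (Python) =====
-- _UPPERS = [151, 251, 386, 493, 649, 721, 809, 905, 1200]
-- _LABELS = [
--     "generation-i", "generation-ii", "generation-iii", "generation-iv",
--     "generation-v", "generation-vi", "generation-vii", "generation-viii",
--     "generation-ix",
-- ]
--
--
-- def _infer_generation(national_dex_numbers):
--     if not isinstance(national_dex_numbers, list) or not national_dex_numbers: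
--         return None
--
--     first = national_dex_numbers[0]
--     if not isinstance(first, int):
--         return None
--
--     if first < 1 or first > 1200:
--         return None
--
--     # hand-written bisect_left over the sorted upper bounds
--     lo, hi = 0, len(_UPPERS)
--     while lo < hi:
--         mid = (lo + hi) // 2
--         if _UPPERS[mid] < first:
--             lo = mid + 1
--         else:
--             hi = mid
--     return _LABELS[lo]
-- ===== Notes on version B (the rewrite author's own statement) =====
-- stated objective: alternative
-- what changed: Replaces the linear scan over (lower, upper, label) range triples with a binary search (hand-written bisect_left) over the sorted upper-bound array plus a parallel label list, after an explicit range guard for first < 1 or first > 1200.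
import Mathlib
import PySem

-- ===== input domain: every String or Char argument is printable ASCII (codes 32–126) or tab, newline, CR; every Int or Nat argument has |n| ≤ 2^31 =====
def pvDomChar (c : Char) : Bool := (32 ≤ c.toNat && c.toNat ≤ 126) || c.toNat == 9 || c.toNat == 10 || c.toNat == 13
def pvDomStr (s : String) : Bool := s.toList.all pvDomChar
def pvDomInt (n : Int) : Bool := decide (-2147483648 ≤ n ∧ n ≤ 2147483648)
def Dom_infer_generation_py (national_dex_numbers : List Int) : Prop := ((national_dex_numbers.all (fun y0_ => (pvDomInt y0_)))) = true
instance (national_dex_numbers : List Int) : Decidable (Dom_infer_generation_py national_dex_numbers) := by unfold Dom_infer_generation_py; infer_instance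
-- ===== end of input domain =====

-- B replaces A's linear scan over (lower, upper, label) range triples by a hand-written
-- bisect_left over the sorted upper bounds with a parallel label list (objective: alternative).

-- ===== PORT A =====
def pvGenerationRanges : List (Int × Int × String) :=
  [(1, 151, "generation-i"), (152, 251, "generation-ii"), (252, 386, "generation-iii"),
   (387, 493, "generation-iv"), (494, 649, "generation-v"), (650, 721, "generation-vi"),
   (722, 809, "generation-vii"), (810, 905, "generation-viii"), (906, 1200, "generation-ix")]

-- the `for lower, upper, generation in _GENERATION_RANGES` loop with its early return
def pvScanRanges (first : Int) : List (Int × Int × String) → Option String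
  | [] => none
  | (lower, upper, generation) :: rest =>
      if lower ≤ first ∧ first ≤ upper then some generation else pvScanRanges first rest

def infer_generation_py (national_dex_numbers : List Int) : Option String :=
  match national_dex_numbers with
  | [] => none                     -- `not national_dex_numbers` (the isinstance guards are
  | first :: _ =>                  -- trivially true on a List Int argument)
      pvScanRanges first pvGenerationRanges

-- ===== PORT B =====
def pvUppers : List Int := [151, 251, 386, 493, 649, 721, 809, 905, 1200]
def pvLabels : List String :=
  ["generation-i", "generation-ii", "generation-iii", "generation-iv", "generation-v",
   "generation-vi", "generation-vii", "generation-viii", "generation-ix"]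

-- Source B's hand-written bisect_left `while lo < hi` loop; the fuel argument only bounds the
-- iteration count (hi - lo ≤ fuel keeps it exact), the loop body is Source B's verbatim
def pvBisectGo (first : Int) : Nat → Nat → Nat → Nat
  | 0, lo, _ => lo
  | fuel + 1, lo, hi =>
      if lo < hi then
        let mid := (lo + hi) / 2
        if pvUppers.getD mid 0 < first then pvBisectGo first fuel (mid + 1) hi
        else pvBisectGo first fuel lo mid
      else lo

def infer_generation_py_alt (national_dex_numbers : List Int) : Option String :=
  match national_dex_numbers with
  | [] => none
  | first :: _ =>
      if first < 1 ∨ first > 1200 then none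
      else
        -- `return _LABELS[lo]`; the guard keeps lo in range, so pyGet? is exact here
        PySem.List.pyGet? pvLabels
          (Int.ofNat (pvBisectGo first pvUppers.length 0 pvUppers.length))

-- ===== PRECONDITION & SPEC =====
def Spec_infer_generation_py (national_dex_numbers : List Int) (out : Option String) : Prop := out = infer_generation_py_alt national_dex_numbers
instance (national_dex_numbers : List Int) (out : Option String) : Decidable (Spec_infer_generation_py national_dex_numbers out) := by unfold Spec_infer_generation_py; infer_instance

-- ===== CLAIM (what is proved, stated in full; the proofs are below) =====
def Claim_equal_infer_generation_py : Prop := ∀ (national_dex_numbers : List Int), Dom_infer_generation_py national_dex_numbers → Spec_infer_generation_py national_dex_numbers (infer_generation_py national_dex_numbers)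

-- ===== LEMMAS AND PROOFS =====

-- one-step evaluations of the fuelled binary search at each reachable (fuel, lo, hi)
theorem pvStep_6_0_1 (f : Int) : pvBisectGo f 6 0 1 = if (151:Int) < f then pvBisectGo f 5 1 1 else pvBisectGo f 5 0 0 := by
  rfl

theorem pvStep_6_5_6 (f : Int) : pvBisectGo f 6 5 6 = if (721:Int) < f then pvBisectGo f 5 6 6 else pvBisectGo f 5 5 5 := by
  rfl

theorem pvStep_7_0_2 (f : Int) : pvBisectGo f 7 0 2 = if (251:Int) < f then pvBisectGo f 6 2 2 else pvBisectGo f 6 0 1 := by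
  rfl

theorem pvStep_7_3_4 (f : Int) : pvBisectGo f 7 3 4 = if (493:Int) < f then pvBisectGo f 6 4 4 else pvBisectGo f 6 3 3 := by
  rfl

theorem pvStep_7_5_7 (f : Int) : pvBisectGo f 7 5 7 = if (809:Int) < f then pvBisectGo f 6 7 7 else pvBisectGo f 6 5 6 := by
  rfl

theorem pvStep_7_8_9 (f : Int) : pvBisectGo f 7 8 9 = if (1200:Int) < f then pvBisectGo f 6 9 9 else pvBisectGo f 6 8 8 := by
  rfl

theorem pvStep_8_0_4 (f : Int) : pvBisectGo f 8 0 4 = if (386:Int) < f then pvBisectGo f 7 3 4 else pvBisectGo f 7 0 2 := by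
  rfl

theorem pvStep_8_5_9 (f : Int) : pvBisectGo f 8 5 9 = if (905:Int) < f then pvBisectGo f 7 8 9 else pvBisectGo f 7 5 7 := by
  rfl

theorem pvStep_9_0_9 (f : Int) : pvBisectGo f 9 0 9 = if (649:Int) < f then pvBisectGo f 8 5 9 else pvBisectGo f 8 0 4 := by
  rfl

theorem pvLeaf_5_0 (f : Int) : pvBisectGo f 5 0 0 = 0 := by rfl
theorem pvLeaf_5_1 (f : Int) : pvBisectGo f 5 1 1 = 1 := by rfl
theorem pvLeaf_5_5 (f : Int) : pvBisectGo f 5 5 5 = 5 := by rfl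
theorem pvLeaf_5_6 (f : Int) : pvBisectGo f 5 6 6 = 6 := by rfl
theorem pvLeaf_6_2 (f : Int) : pvBisectGo f 6 2 2 = 2 := by rfl
theorem pvLeaf_6_3 (f : Int) : pvBisectGo f 6 3 3 = 3 := by rfl
theorem pvLeaf_6_4 (f : Int) : pvBisectGo f 6 4 4 = 4 := by rfl
theorem pvLeaf_6_7 (f : Int) : pvBisectGo f 6 7 7 = 7 := by rfl
theorem pvLeaf_6_8 (f : Int) : pvBisectGo f 6 8 8 = 8 := by rfl

-- the search lands on index i exactly on the i-th range
theorem pvBs0 (f : Int) (h1 : (1:Int) ≤ f) (h2 : f ≤ 151) : pvBisectGo f 9 0 9 = 0 := by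
  rw [pvStep_9_0_9, if_neg (by omega : ¬ (649:Int) < f), pvStep_8_0_4, if_neg (by omega : ¬ (386:Int) < f), pvStep_7_0_2, if_neg (by omega : ¬ (251:Int) < f), pvStep_6_0_1, if_neg (by omega : ¬ (151:Int) < f), pvLeaf_5_0]

theorem pvBs1 (f : Int) (h1 : (152:Int) ≤ f) (h2 : f ≤ 251) : pvBisectGo f 9 0 9 = 1 := by
  rw [pvStep_9_0_9, if_neg (by omega : ¬ (649:Int) < f), pvStep_8_0_4, if_neg (by omega : ¬ (386:Int) < f), pvStep_7_0_2, if_neg (by omega : ¬ (251:Int) < f), pvStep_6_0_1, if_pos (by omega : (151:Int) < f), pvLeaf_5_1]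

theorem pvBs2 (f : Int) (h1 : (252:Int) ≤ f) (h2 : f ≤ 386) : pvBisectGo f 9 0 9 = 2 := by
  rw [pvStep_9_0_9, if_neg (by omega : ¬ (649:Int) < f), pvStep_8_0_4, if_neg (by omega : ¬ (386:Int) < f), pvStep_7_0_2, if_pos (by omega : (251:Int) < f), pvLeaf_6_2]

theorem pvBs3 (f : Int) (h1 : (387:Int) ≤ f) (h2 : f ≤ 493) : pvBisectGo f 9 0 9 = 3 := by
  rw [pvStep_9_0_9, if_neg (by omega : ¬ (649:Int) < f), pvStep_8_0_4, if_pos (by omega : (386:Int) < f), pvStep_7_3_4, if_neg (by omega : ¬ (493:Int) < f), pvLeaf_6_3]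

theorem pvBs4 (f : Int) (h1 : (494:Int) ≤ f) (h2 : f ≤ 649) : pvBisectGo f 9 0 9 = 4 := by
  rw [pvStep_9_0_9, if_neg (by omega : ¬ (649:Int) < f), pvStep_8_0_4, if_pos (by omega : (386:Int) < f), pvStep_7_3_4, if_pos (by omega : (493:Int) < f), pvLeaf_6_4]

theorem pvBs5 (f : Int) (h1 : (650:Int) ≤ f) (h2 : f ≤ 721) : pvBisectGo f 9 0 9 = 5 := by
  rw [pvStep_9_0_9, if_pos (by omega : (649:Int) < f), pvStep_8_5_9, if_neg (by omega : ¬ (905:Int) < f), pvStep_7_5_7, if_neg (by omega : ¬ (809:Int) < f), pvStep_6_5_6, if_neg (by omega : ¬ (721:Int) < f), pvLeaf_5_5]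

theorem pvBs6 (f : Int) (h1 : (722:Int) ≤ f) (h2 : f ≤ 809) : pvBisectGo f 9 0 9 = 6 := by
  rw [pvStep_9_0_9, if_pos (by omega : (649:Int) < f), pvStep_8_5_9, if_neg (by omega : ¬ (905:Int) < f), pvStep_7_5_7, if_neg (by omega : ¬ (809:Int) < f), pvStep_6_5_6, if_pos (by omega : (721:Int) < f), pvLeaf_5_6]

theorem pvBs7 (f : Int) (h1 : (810:Int) ≤ f) (h2 : f ≤ 905) : pvBisectGo f 9 0 9 = 7 := by
  rw [pvStep_9_0_9, if_pos (by omega : (649:Int) < f), pvStep_8_5_9, if_neg (by omega : ¬ (905:Int) < f), pvStep_7_5_7, if_pos (by omega : (809:Int) < f), pvLeaf_6_7]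

theorem pvBs8 (f : Int) (h1 : (906:Int) ≤ f) (h2 : f ≤ 1200) : pvBisectGo f 9 0 9 = 8 := by
  rw [pvStep_9_0_9, if_pos (by omega : (649:Int) < f), pvStep_8_5_9, if_pos (by omega : (905:Int) < f), pvStep_7_8_9, if_neg (by omega : ¬ (1200:Int) < f), pvLeaf_6_8]

theorem pvGet0 : PySem.List.pyGet? pvLabels (Int.ofNat 0) = some "generation-i" := by rfl
theorem pvGet1 : PySem.List.pyGet? pvLabels (Int.ofNat 1) = some "generation-ii" := by rfl
theorem pvGet2 : PySem.List.pyGet? pvLabels (Int.ofNat 2) = some "generation-iii" := by rfl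
theorem pvGet3 : PySem.List.pyGet? pvLabels (Int.ofNat 3) = some "generation-iv" := by rfl
theorem pvGet4 : PySem.List.pyGet? pvLabels (Int.ofNat 4) = some "generation-v" := by rfl
theorem pvGet5 : PySem.List.pyGet? pvLabels (Int.ofNat 5) = some "generation-vi" := by rfl
theorem pvGet6 : PySem.List.pyGet? pvLabels (Int.ofNat 6) = some "generation-vii" := by rfl
theorem pvGet7 : PySem.List.pyGet? pvLabels (Int.ofNat 7) = some "generation-viii" := by rfl
theorem pvGet8 : PySem.List.pyGet? pvLabels (Int.ofNat 8) = some "generation-ix" := by rfl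

-- A's scan on the i-th range
theorem pvScan0 (f : Int) (h1 : (1:Int) ≤ f) (h2 : f ≤ 151) : pvScanRanges f pvGenerationRanges = some "generation-i" := by
  simp only [pvScanRanges, pvGenerationRanges]
  rw [if_pos (⟨h1, h2⟩ : (1:Int) ≤ f ∧ f ≤ 151)]

theorem pvScan1 (f : Int) (h1 : (152:Int) ≤ f) (h2 : f ≤ 251) : pvScanRanges f pvGenerationRanges = some "generation-ii" := by
  simp only [pvScanRanges, pvGenerationRanges]
  rw [if_neg (by omega : ¬ ((1:Int) ≤ f ∧ f ≤ 151)), if_pos (⟨h1, h2⟩ : (152:Int) ≤ f ∧ f ≤ 251)]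

theorem pvScan2 (f : Int) (h1 : (252:Int) ≤ f) (h2 : f ≤ 386) : pvScanRanges f pvGenerationRanges = some "generation-iii" := by
  simp only [pvScanRanges, pvGenerationRanges]
  rw [if_neg (by omega : ¬ ((1:Int) ≤ f ∧ f ≤ 151)), if_neg (by omega : ¬ ((152:Int) ≤ f ∧ f ≤ 251)), if_pos (⟨h1, h2⟩ : (252:Int) ≤ f ∧ f ≤ 386)]

theorem pvScan3 (f : Int) (h1 : (387:Int) ≤ f) (h2 : f ≤ 493) : pvScanRanges f pvGenerationRanges = some "generation-iv" := by
  simp only [pvScanRanges, pvGenerationRanges]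
  rw [if_neg (by omega : ¬ ((1:Int) ≤ f ∧ f ≤ 151)), if_neg (by omega : ¬ ((152:Int) ≤ f ∧ f ≤ 251)), if_neg (by omega : ¬ ((252:Int) ≤ f ∧ f ≤ 386)), if_pos (⟨h1, h2⟩ : (387:Int) ≤ f ∧ f ≤ 493)]

theorem pvScan4 (f : Int) (h1 : (494:Int) ≤ f) (h2 : f ≤ 649) : pvScanRanges f pvGenerationRanges = some "generation-v" := by
  simp only [pvScanRanges, pvGenerationRanges]
  rw [if_neg (by omega : ¬ ((1:Int) ≤ f ∧ f ≤ 151)), if_neg (by omega : ¬ ((152:Int) ≤ f ∧ f ≤ 251)), if_neg (by omega : ¬ ((252:Int) ≤ f ∧ f ≤ 386)), if_neg (by omega : ¬ ((387:Int) ≤ f ∧ f ≤ 493)), if_pos (⟨h1, h2⟩ : (494:Int) ≤ f ∧ f ≤ 649)]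

theorem pvScan5 (f : Int) (h1 : (650:Int) ≤ f) (h2 : f ≤ 721) : pvScanRanges f pvGenerationRanges = some "generation-vi" := by
  simp only [pvScanRanges, pvGenerationRanges]
  rw [if_neg (by omega : ¬ ((1:Int) ≤ f ∧ f ≤ 151)), if_neg (by omega : ¬ ((152:Int) ≤ f ∧ f ≤ 251)), if_neg (by omega : ¬ ((252:Int) ≤ f ∧ f ≤ 386)), if_neg (by omega : ¬ ((387:Int) ≤ f ∧ f ≤ 493)), if_neg (by omega : ¬ ((494:Int) ≤ f ∧ f ≤ 649)), if_pos (⟨h1, h2⟩ : (650:Int) ≤ f ∧ f ≤ 721)]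

theorem pvScan6 (f : Int) (h1 : (722:Int) ≤ f) (h2 : f ≤ 809) : pvScanRanges f pvGenerationRanges = some "generation-vii" := by
  simp only [pvScanRanges, pvGenerationRanges]
  rw [if_neg (by omega : ¬ ((1:Int) ≤ f ∧ f ≤ 151)), if_neg (by omega : ¬ ((152:Int) ≤ f ∧ f ≤ 251)), if_neg (by omega : ¬ ((252:Int) ≤ f ∧ f ≤ 386)), if_neg (by omega : ¬ ((387:Int) ≤ f ∧ f ≤ 493)), if_neg (by omega : ¬ ((494:Int) ≤ f ∧ f ≤ 649)), if_neg (by omega : ¬ ((650:Int) ≤ f ∧ f ≤ 721)), if_pos (⟨h1, h2⟩ : (722:Int) ≤ f ∧ f ≤ 809)]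

theorem pvScan7 (f : Int) (h1 : (810:Int) ≤ f) (h2 : f ≤ 905) : pvScanRanges f pvGenerationRanges = some "generation-viii" := by
  simp only [pvScanRanges, pvGenerationRanges]
  rw [if_neg (by omega : ¬ ((1:Int) ≤ f ∧ f ≤ 151)), if_neg (by omega : ¬ ((152:Int) ≤ f ∧ f ≤ 251)), if_neg (by omega : ¬ ((252:Int) ≤ f ∧ f ≤ 386)), if_neg (by omega : ¬ ((387:Int) ≤ f ∧ f ≤ 493)), if_neg (by omega : ¬ ((494:Int) ≤ f ∧ f ≤ 649)), if_neg (by omega : ¬ ((650:Int) ≤ f ∧ f ≤ 721)), if_neg (by omega : ¬ ((722:Int) ≤ f ∧ f ≤ 809)), if_pos (⟨h1, h2⟩ : (810:Int) ≤ f ∧ f ≤ 905)]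

theorem pvScan8 (f : Int) (h1 : (906:Int) ≤ f) (h2 : f ≤ 1200) : pvScanRanges f pvGenerationRanges = some "generation-ix" := by
  simp only [pvScanRanges, pvGenerationRanges]
  rw [if_neg (by omega : ¬ ((1:Int) ≤ f ∧ f ≤ 151)), if_neg (by omega : ¬ ((152:Int) ≤ f ∧ f ≤ 251)), if_neg (by omega : ¬ ((252:Int) ≤ f ∧ f ≤ 386)), if_neg (by omega : ¬ ((387:Int) ≤ f ∧ f ≤ 493)), if_neg (by omega : ¬ ((494:Int) ≤ f ∧ f ≤ 649)), if_neg (by omega : ¬ ((650:Int) ≤ f ∧ f ≤ 721)), if_neg (by omega : ¬ ((722:Int) ≤ f ∧ f ≤ 809)), if_neg (by omega : ¬ ((810:Int) ≤ f ∧ f ≤ 905)), if_pos (⟨h1, h2⟩ : (906:Int) ≤ f ∧ f ≤ 1200)]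

-- per-range agreement
theorem pvEq0 (f : Int) (rest : List Int) (h1 : (1:Int) ≤ f) (h2 : f ≤ 151) :
    infer_generation_py (f :: rest) = infer_generation_py_alt (f :: rest) := by
  simp only [infer_generation_py, infer_generation_py_alt]
  rw [if_neg (by omega : ¬ (f < 1 ∨ f > 1200)), (by rfl : pvUppers.length = 9),
     pvBs0 f h1 h2, pvGet0, pvScan0 f h1 h2]

theorem pvEq1 (f : Int) (rest : List Int) (h1 : (152:Int) ≤ f) (h2 : f ≤ 251) :
    infer_generation_py (f :: rest) = infer_generation_py_alt (f :: rest) := by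
  simp only [infer_generation_py, infer_generation_py_alt]
  rw [if_neg (by omega : ¬ (f < 1 ∨ f > 1200)), (by rfl : pvUppers.length = 9),
     pvBs1 f h1 h2, pvGet1, pvScan1 f h1 h2]

theorem pvEq2 (f : Int) (rest : List Int) (h1 : (252:Int) ≤ f) (h2 : f ≤ 386) :
    infer_generation_py (f :: rest) = infer_generation_py_alt (f :: rest) := by
  simp only [infer_generation_py, infer_generation_py_alt]
  rw [if_neg (by omega : ¬ (f < 1 ∨ f > 1200)), (by rfl : pvUppers.length = 9),
     pvBs2 f h1 h2, pvGet2, pvScan2 f h1 h2]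

theorem pvEq3 (f : Int) (rest : List Int) (h1 : (387:Int) ≤ f) (h2 : f ≤ 493) :
    infer_generation_py (f :: rest) = infer_generation_py_alt (f :: rest) := by
  simp only [infer_generation_py, infer_generation_py_alt]
  rw [if_neg (by omega : ¬ (f < 1 ∨ f > 1200)), (by rfl : pvUppers.length = 9),
     pvBs3 f h1 h2, pvGet3, pvScan3 f h1 h2]

theorem pvEq4 (f : Int) (rest : List Int) (h1 : (494:Int) ≤ f) (h2 : f ≤ 649) :
    infer_generation_py (f :: rest) = infer_generation_py_alt (f :: rest) := by
  simp only [infer_generation_py, infer_generation_py_alt]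
  rw [if_neg (by omega : ¬ (f < 1 ∨ f > 1200)), (by rfl : pvUppers.length = 9),
     pvBs4 f h1 h2, pvGet4, pvScan4 f h1 h2]

theorem pvEq5 (f : Int) (rest : List Int) (h1 : (650:Int) ≤ f) (h2 : f ≤ 721) :
    infer_generation_py (f :: rest) = infer_generation_py_alt (f :: rest) := by
  simp only [infer_generation_py, infer_generation_py_alt]
  rw [if_neg (by omega : ¬ (f < 1 ∨ f > 1200)), (by rfl : pvUppers.length = 9),
     pvBs5 f h1 h2, pvGet5, pvScan5 f h1 h2]

theorem pvEq6 (f : Int) (rest : List Int) (h1 : (722:Int) ≤ f) (h2 : f ≤ 809) :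
    infer_generation_py (f :: rest) = infer_generation_py_alt (f :: rest) := by
  simp only [infer_generation_py, infer_generation_py_alt]
  rw [if_neg (by omega : ¬ (f < 1 ∨ f > 1200)), (by rfl : pvUppers.length = 9),
     pvBs6 f h1 h2, pvGet6, pvScan6 f h1 h2]

theorem pvEq7 (f : Int) (rest : List Int) (h1 : (810:Int) ≤ f) (h2 : f ≤ 905) :
    infer_generation_py (f :: rest) = infer_generation_py_alt (f :: rest) := by
  simp only [infer_generation_py, infer_generation_py_alt]
  rw [if_neg (by omega : ¬ (f < 1 ∨ f > 1200)), (by rfl : pvUppers.length = 9),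
     pvBs7 f h1 h2, pvGet7, pvScan7 f h1 h2]

theorem pvEq8 (f : Int) (rest : List Int) (h1 : (906:Int) ≤ f) (h2 : f ≤ 1200) :
    infer_generation_py (f :: rest) = infer_generation_py_alt (f :: rest) := by
  simp only [infer_generation_py, infer_generation_py_alt]
  rw [if_neg (by omega : ¬ (f < 1 ∨ f > 1200)), (by rfl : pvUppers.length = 9),
     pvBs8 f h1 h2, pvGet8, pvScan8 f h1 h2]

theorem pvCore_eq (f : Int) (rest : List Int) :
    infer_generation_py (f :: rest) = infer_generation_py_alt (f :: rest) := by
  by_cases hout : f < 1 ∨ f > 1200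
  · simp only [infer_generation_py, infer_generation_py_alt, pvScanRanges, pvGenerationRanges]
    rw [if_pos hout]
    split_ifs <;> first | rfl | omega
  · have hcases : ((1:Int) ≤ f ∧ f ≤ 151) ∨ ((152:Int) ≤ f ∧ f ≤ 251) ∨ ((252:Int) ≤ f ∧ f ≤ 386) ∨ ((387:Int) ≤ f ∧ f ≤ 493) ∨ ((494:Int) ≤ f ∧ f ≤ 649) ∨ ((650:Int) ≤ f ∧ f ≤ 721) ∨ ((722:Int) ≤ f ∧ f ≤ 809) ∨ ((810:Int) ≤ f ∧ f ≤ 905) ∨ ((906:Int) ≤ f ∧ f ≤ 1200) := by omega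
    rcases hcases with ⟨h1,h2⟩|⟨h1,h2⟩|⟨h1,h2⟩|⟨h1,h2⟩|⟨h1,h2⟩|⟨h1,h2⟩|⟨h1,h2⟩|⟨h1,h2⟩|⟨h1,h2⟩
    · exact pvEq0 f rest h1 h2
    · exact pvEq1 f rest h1 h2
    · exact pvEq2 f rest h1 h2
    · exact pvEq3 f rest h1 h2
    · exact pvEq4 f rest h1 h2
    · exact pvEq5 f rest h1 h2
    · exact pvEq6 f rest h1 h2
    · exact pvEq7 f rest h1 h2
    · exact pvEq8 f rest h1 h2

-- ===== VERDICT (by name: the statement is the Claim_ definition above) =====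
theorem infer_generation_py_spec : Claim_equal_infer_generation_py := by
  intro xs _
  unfold Spec_infer_generation_py
  cases xs with
  | nil => rfl
  | cons first rest => exact pvCore_eq first rest
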